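-- pv_equiv track=rewrite | github.com/RTroshin/Codewars | Python/7 kyu/Where Are My Glasses?.py | find_glasses
-- ===== SOURCE A (Python) =====
-- def find_glasses(lst):
--     for i, gls in enumerate(lst):
--         for j in range(len(gls) - 1):
--             if gls[j] == 'O' and gls[j + 1] == '-':
--                 for n in range(j + 2, len(gls)):
--                     if gls[n] == 'O':
--                         return i
--                     elif gls[n] != '-':
--                         break
--     return 0
-- ===== SOURCE B (Python) =====
-- def find_glasses(lst):
--     for i, gls in enumerate(lst):
--         if any(seg and set(seg) == {'-'} for seg in gls.split('O')[1:-1]):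
--             return i
--     return 0
-- ===== Notes on version B (the rewrite author's own statement) =====
-- stated objective: simpler
-- what changed: Replaced A's triple-nested char-index scan (find 'O', check next char is '-', scan forward over dashes for a closing 'O') by a split-on-'O' pass: a row matches iff some interior segment of gls.split('O') is non-empty and all dashes.
import Mathlib
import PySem

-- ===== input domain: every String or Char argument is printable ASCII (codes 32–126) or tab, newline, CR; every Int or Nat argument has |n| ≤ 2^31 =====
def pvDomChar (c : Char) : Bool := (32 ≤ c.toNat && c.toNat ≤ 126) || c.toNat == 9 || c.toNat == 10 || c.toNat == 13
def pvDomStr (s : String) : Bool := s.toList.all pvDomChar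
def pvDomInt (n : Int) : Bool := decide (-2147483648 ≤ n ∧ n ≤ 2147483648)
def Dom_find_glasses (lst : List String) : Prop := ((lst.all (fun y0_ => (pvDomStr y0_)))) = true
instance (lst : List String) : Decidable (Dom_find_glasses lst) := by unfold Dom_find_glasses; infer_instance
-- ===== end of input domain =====

-- B replaces A's nested char-index scans by a split-on-'O' segment inspection (simpler, one pass per row).

-- ===== PORT A =====
-- inner loop 'for n in range(j+2, len(gls))': returns true on 'return i', false on break / loop end.
-- gls[n] is always in range here (n < len(gls)), so List.getD is exact.
def pvInnerA (s : List Char) (n : Nat) : Bool :=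
  if _h : n < s.length then
    if s.getD n ' ' == 'O' then true
    else if s.getD n ' ' != '-' then false
    else pvInnerA s (n + 1)
  else false
termination_by s.length - n

-- 'for j in range(len(gls) - 1)': for len 0 Python's range(-1) is empty, as is List.range (0-1=0).
def pvRowA (s : List Char) : Bool :=
  (List.range (s.length - 1)).any (fun j =>
    s.getD j ' ' == 'O' && s.getD (j + 1) ' ' == '-' && pvInnerA s (j + 2))

-- 'for i, gls in enumerate(lst): … return i' / fall through to 'return 0'
def pvGoA (lst : List String) (i : Int) : Int :=
  match lst with
  | [] => 0
  | g :: rest => if pvRowA g.toList then i else pvGoA rest (i + 1)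

def find_glasses (lst : List String) : Int := pvGoA lst 0

-- ===== PORT B =====
-- gls.split('O') on the char list (single-char separator split, exact incl. empty segments)
def pvSplitC : List Char → List (List Char)
  | [] => [[]]
  | c :: r =>
    if c = 'O' then [] :: pvSplitC r
    else
      match pvSplitC r with
      | h :: t => (c :: h) :: t
      | [] => [[c]]  -- unreachable: pvSplitC never returns []

-- 'seg and set(seg) == {"-"}' ≡ seg non-empty and every char '-' ; segs[1:-1] ≡ drop 1 then dropLast (exact for Python list slicing)
def pvRowB (s : List Char) : Bool :=
  (((pvSplitC s).drop 1).dropLast).any (fun seg => !seg.isEmpty && seg.all (· == '-'))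

def pvGoB (lst : List String) (i : Int) : Int :=
  match lst with
  | [] => 0
  | g :: rest => if pvRowB g.toList then i else pvGoB rest (i + 1)

def find_glasses_alt (lst : List String) : Int := pvGoB lst 0

-- ===== PRECONDITION & SPEC =====
def Spec_find_glasses (lst : List String) (out : Int) : Prop := out = find_glasses_alt lst
instance (lst : List String) (out : Int) : Decidable (Spec_find_glasses lst out) := by unfold Spec_find_glasses; infer_instance

-- ===== CLAIM (what is proved, stated in full; the proofs are below) =====
def Claim_equal_find_glasses : Prop := ∀ (lst : List String), Dom_find_glasses lst → Spec_find_glasses lst (find_glasses lst)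

-- ===== LEMMAS AND PROOFS =====

-- reference characterisation of a matching row: somewhere "O-", then dashes until an 'O'
def pvAfterODash : List Char → Bool
  | [] => false
  | c :: r => if c = 'O' then true else if c = '-' then pvAfterODash r else false

def pvHeadPat (s : List Char) : Bool :=
  match s with
  | c :: d :: r => c == 'O' && d == '-' && pvAfterODash r
  | _ => false

def pvHasPat : List Char → Bool
  | [] => false
  | c :: r => pvHeadPat (c :: r) || pvHasPat r

theorem pvInnerA_cons_succ (c : Char) (r : List Char) (m : Nat) :
    pvInnerA (c :: r) (m + 1) = pvInnerA r m := by
  induction hk : r.length - m generalizing m with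
  | zero =>
    have h1 : ¬ (m + 1 < (c :: r).length) := by simp; omega
    have h2 : ¬ (m < r.length) := by omega
    conv_lhs => rw [pvInnerA]
    conv_rhs => rw [pvInnerA]
    simp [h2]
  | succ k ih =>
    have hm : m < r.length := by omega
    have h1 : m + 1 < (c :: r).length := by simp; omega
    conv_lhs => rw [pvInnerA]
    conv_rhs => rw [pvInnerA]
    rw [dif_pos h1, dif_pos hm, List.getD_cons_succ, ih (m + 1) (by omega)]

theorem pvInnerA_zero (s : List Char) : pvInnerA s 0 = pvAfterODash s := by
  induction s with
  | nil => rw [pvInnerA]; simp [pvAfterODash]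
  | cons c r ih =>
    rw [pvInnerA, pvAfterODash]
    have h1 : 0 < (c :: r).length := by simp
    rw [dif_pos h1, List.getD_cons_zero]
    by_cases h : c = 'O'
    · simp [h]
    · by_cases h2 : c = '-'
      · simp [h2, pvInnerA_cons_succ, ih]
      · simp [h, h2]

theorem pvInnerA_eq (s : List Char) (n : Nat) : pvInnerA s n = pvAfterODash (s.drop n) := by
  induction n generalizing s with
  | zero => rw [pvInnerA_zero]; rfl
  | succ m ih =>
    cases s with
    | nil =>
      rw [pvInnerA]
      simp [pvAfterODash]
    | cons c r => rw [pvInnerA_cons_succ, ih, List.drop_succ_cons]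

theorem pvRowA_eq_hasPat (s : List Char) : pvRowA s = pvHasPat s := by
  induction s with
  | nil => rfl
  | cons c r ih =>
    cases r with
    | nil =>
      rw [pvRowA, pvHasPat, pvHasPat]
      simp [pvHeadPat]
    | cons d u =>
      rw [pvRowA]
      have hlen : (c :: d :: u : List Char).length - 1 = u.length + 1 := by simp
      rw [hlen, List.range_succ_eq_map, List.any_cons, List.any_map]
      have hshift :
          ((fun j => (c :: d :: u : List Char).getD j ' ' == 'O' &&
              (c :: d :: u : List Char).getD (j + 1) ' ' == '-' && pvInnerA (c :: d :: u) (j + 2)) ∘ Nat.succ)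
          = (fun j => (d :: u : List Char).getD j ' ' == 'O' &&
              (d :: u : List Char).getD (j + 1) ' ' == '-' && pvInnerA (d :: u) (j + 2)) := by
        funext j
        simp only [Function.comp_apply, Nat.succ_eq_add_one, List.getD_cons_succ]
        have e : j + 1 + 2 = (j + 2) + 1 := by omega
        rw [e, pvInnerA_cons_succ]
      rw [hshift]
      have hu : ((List.range u.length).any
          (fun j => (d :: u : List Char).getD j ' ' == 'O' &&
            (d :: u : List Char).getD (j + 1) ' ' == '-' && pvInnerA (d :: u) (j + 2))) = pvHasPat (d :: u) := by
        rw [← ih, pvRowA]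
        simp
      rw [hu, pvHasPat]
      congr 1
      simp [pvHeadPat, pvInnerA_eq]

theorem pvAfterODash_mem (r : List Char) (h : pvAfterODash r = true) : 'O' ∈ r := by
  induction r with
  | nil => simp [pvAfterODash] at h
  | cons c t ih =>
    rw [pvAfterODash] at h
    by_cases hc : c = 'O'
    · simp [hc]
    · by_cases hd : c = '-'
      · simp [hd] at h
        exact List.mem_cons_of_mem _ (ih h)
      · simp [hc, hd] at h

theorem pvHasPat_mem (r : List Char) (h : pvHasPat r = true) : 'O' ∈ r := by
  induction r with
  | nil => simp [pvHasPat] at h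
  | cons c t ih =>
    rw [pvHasPat] at h
    rcases Bool.or_eq_true_iff.mp h with h1 | h1
    · cases t with
      | nil => simp [pvHeadPat] at h1
      | cons d v =>
        rw [pvHeadPat] at h1
        simp only [Bool.and_eq_true, beq_iff_eq] at h1
        simp [h1.1.1]
    · exact List.mem_cons_of_mem _ (ih h1)

theorem pvSplitC_struct (r : List Char) :
    pvSplitC r = (r.takeWhile (· ≠ 'O')) ::
      (if 'O' ∈ r then pvSplitC ((r.dropWhile (· ≠ 'O')).tail) else []) := by
  induction r with
  | nil => simp [pvSplitC]
  | cons c t ih =>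
    by_cases hc : c = 'O'
    · rw [pvSplitC]
      simp [hc, List.takeWhile, List.dropWhile]
    · rw [pvSplitC, if_neg hc, ih]
      by_cases hm : 'O' ∈ t
      · have hin : 'O' ∈ c :: t := List.mem_cons_of_mem _ hm
        simp [hc, hm, hin, List.takeWhile, List.dropWhile]
      · have hnin : 'O' ∉ c :: t := by
          intro hmem
          rcases List.mem_cons.mp hmem with e | e
          · exact hc e.symm
          · exact hm e
        simp [hc, hm, hnin, List.takeWhile]

theorem pvAfterODash_eq_takeWhile (r : List Char) (h : 'O' ∈ r) :
    pvAfterODash r = (r.takeWhile (· ≠ 'O')).all (· == '-') := by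
  induction r with
  | nil => simp at h
  | cons c t ih =>
    rw [pvAfterODash]
    by_cases hc : c = 'O'
    · simp [hc, List.takeWhile]
    · have ht : 'O' ∈ t := by
        rcases List.mem_cons.mp h with h1 | h1
        · exact absurd h1.symm hc
        · exact h1
      by_cases hd : c = '-'
      · simp [hd, List.takeWhile, ih ht]
      · simp [hc, hd, List.takeWhile]

theorem pvRowB_eq_hasPat (s : List Char) : pvRowB s = pvHasPat s := by
  induction s with
  | nil => rfl
  | cons c r ih =>
    by_cases hc : c = 'O'
    · subst hc
      have e1 : pvSplitC ('O' :: r) = [] :: pvSplitC r := by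
        rw [pvSplitC]
        simp
      rw [pvRowB, e1]
      have e2 : (([] : List Char) :: pvSplitC r).drop 1 = pvSplitC r := rfl
      rw [e2]
      by_cases hm : 'O' ∈ r
      · rw [pvSplitC_struct r, if_pos hm, pvSplitC_struct ((r.dropWhile (· ≠ 'O')).tail),
          List.dropLast_cons₂, List.any_cons]
        have hr : ((pvSplitC ((r.dropWhile (· ≠ 'O')).tail)).dropLast).any
            (fun seg => !seg.isEmpty && seg.all (· == '-')) = pvHasPat r := by
          rw [← ih, pvRowB, pvSplitC_struct r, if_pos hm]
          rfl
        rw [← pvSplitC_struct ((r.dropWhile (· ≠ 'O')).tail), hr, pvHasPat]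
        congr 1
        cases r with
        | nil => simp at hm
        | cons d v =>
          by_cases hdO : d = 'O'
          · subst hdO
            simp [pvHeadPat, List.takeWhile]
          · by_cases hdd : d = '-'
            · subst hdd
              have hv : 'O' ∈ v := by
                rcases List.mem_cons.mp hm with h1 | h1
                · exact absurd h1.symm (by decide)
                · exact h1
              simp [pvHeadPat, List.takeWhile, pvAfterODash_eq_takeWhile v hv]
            · have hb : (d == '-') = false := by simp [hdd]
              simp [pvHeadPat, List.takeWhile, hdO, hb]
      · rw [pvSplitC_struct r, if_neg hm]
        have hp : pvHasPat r = false := by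
          cases hpp : pvHasPat r
          · rfl
          · exact absurd (pvHasPat_mem r hpp) hm
        have hh : pvHeadPat ('O' :: r) = false := by
          cases r with
          | nil => rfl
          | cons d v =>
            have hav : pvAfterODash v = false := by
              cases hav : pvAfterODash v
              · rfl
              · exact absurd (List.mem_cons_of_mem _ (pvAfterODash_mem v hav)) hm
            simp [pvHeadPat, hav]
        simp [pvHasPat, hp, hh]
    · -- c ≠ 'O': the head segment absorbs c, the interior segments are unchanged
      have e1 : pvSplitC (c :: r) = (c :: (r.takeWhile (· ≠ 'O'))) ::
          (if 'O' ∈ r then pvSplitC ((r.dropWhile (· ≠ 'O')).tail) else []) := by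
        rw [pvSplitC, if_neg hc, pvSplitC_struct r]
      have hh : pvHeadPat (c :: r) = false := by
        cases r with
        | nil => rfl
        | cons d v => simp [pvHeadPat, hc]
      have hint : pvRowB r = ((if 'O' ∈ r then pvSplitC ((r.dropWhile (· ≠ 'O')).tail)
          else []).dropLast).any (fun seg => !seg.isEmpty && seg.all (· == '-')) := by
        rw [pvRowB, pvSplitC_struct r]
        rfl
      rw [pvRowB, e1, pvHasPat, hh, Bool.false_or, ← ih, hint]
      rfl

theorem pvRow_eq (s : List Char) : pvRowB s = pvRowA s := by
  rw [pvRowB_eq_hasPat, pvRowA_eq_hasPat]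

theorem pvGo_eq (lst : List String) (i : Int) : pvGoA lst i = pvGoB lst i := by
  induction lst generalizing i with
  | nil => rfl
  | cons g rest ih => simp [pvGoA, pvGoB, pvRow_eq, ih]

-- ===== VERDICT (by name: the statement is the Claim_ definition above) =====
theorem find_glasses_spec : Claim_equal_find_glasses := by
  intro lst _
  unfold Spec_find_glasses find_glasses find_glasses_alt
  exact pvGo_eq lst 0
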